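-- pv_equiv track=rewrite | github.com/jyy0553/Conv-KNRM | units.py | get_word_dic
-- ===== SOURCE A (Python) =====
-- def get_word_dic(doc_wordList):
-- 	wid = 0
-- 	word_dic = {}
-- 	for doc in doc_wordList:
-- 		for item in doc_wordList[doc]:
-- 			if item not in word_dic:
-- 				word_dic.update({item:wid})
-- 				wid += 1
-- 	print ("\nget_word_dic over!!\n")
-- 	return word_dic
-- ===== SOURCE B (Python) =====
-- def get_word_dic(doc_wordList):
-- 	words = [w for ws in doc_wordList.values() for w in ws]
-- 	first = {}
-- 	for i, w in reversed(list(enumerate(words))):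
-- 		first[w] = i
-- 	order = sorted(first, key=first.get)
-- 	word_dic = dict(zip(order, range(len(order))))
-- 	print ("\nget_word_dic over!!\n")
-- 	return word_dic
-- ===== Notes on version B (the rewrite author's own statement) =====
-- stated objective: alternative
-- what changed: Instead of A's single interleaved pass with a membership test and a running wid counter, B scans the flattened words in reverse overwriting a dict so each word ends up mapped to its first-occurrence position, then sorts the words by that position and assigns ids by rank (zip with range).
import Mathlib
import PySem

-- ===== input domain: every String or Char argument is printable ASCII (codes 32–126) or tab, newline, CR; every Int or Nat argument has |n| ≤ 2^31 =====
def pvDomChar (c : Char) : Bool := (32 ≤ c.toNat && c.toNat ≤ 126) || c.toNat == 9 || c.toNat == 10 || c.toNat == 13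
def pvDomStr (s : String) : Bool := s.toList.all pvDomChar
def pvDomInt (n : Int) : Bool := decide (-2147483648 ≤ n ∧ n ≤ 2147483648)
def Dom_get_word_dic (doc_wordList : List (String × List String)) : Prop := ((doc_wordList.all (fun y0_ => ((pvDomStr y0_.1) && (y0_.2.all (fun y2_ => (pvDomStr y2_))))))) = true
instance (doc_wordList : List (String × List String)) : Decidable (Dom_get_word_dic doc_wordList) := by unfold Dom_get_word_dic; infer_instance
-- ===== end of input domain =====

-- B is a different algorithm: a reverse scan overwriting a dict records each word's
-- first-occurrence position, then the words are sorted by that position and numbered by rank —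
-- instead of A's single interleaved pass with a membership test and a running wid counter.
-- Equivalence is about the RETURN value; both Pythons perform the same print side effect.

-- ===== PORT A =====
-- A iterates the dict's keys and looks each one up; since a dict's keys are unique that is
-- exactly iterating the (key, value) pairs, which is how the fold below walks the input.
def get_word_dic (doc_wordList : List (String × List String)) : List (String × Int) :=
  (doc_wordList.foldl
    (fun (st : Int × PySem.Dict String Int) doc =>
      doc.2.foldl
        (fun (st : Int × PySem.Dict String Int) item =>
          if !(st.2.contains item) then (st.1 + 1, st.2.insert item st.1) else st)
        st)
    (0, PySem.Dict.empty)).2.items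

-- ===== PORT B =====
-- key=first.get is only applied to keys of `first`, where .get returns the stored value;
-- ported as getD with an (unreachable) default 0, exact on those inputs.
def get_word_dic_alt (doc_wordList : List (String × List String)) : List (String × Int) :=
  let words := doc_wordList.flatMap (fun doc => doc.2)        -- [w for ws in d.values() for w in ws]
  let first : PySem.Dict String Int :=                        -- for i, w in reversed(list(enumerate(words))): first[w] = i
    ((PySem.List.enumerate words 0).reverse).foldl (fun d p => d.insert p.2 p.1) PySem.Dict.empty
  let order := PySem.List.sorted first.keys (fun w => first.getD w 0) false   -- sorted(first, key=first.get)
  (PySem.Dict.ofList (order.zip (PySem.List.pyRange 0 order.length 1))).items -- dict(zip(order, range(len(order))))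

-- ===== PRECONDITION & SPEC =====
def Spec_get_word_dic (doc_wordList : List (String × List String)) (out : List (String × Int)) : Prop := out = get_word_dic_alt doc_wordList
instance (doc_wordList : List (String × List String)) (out : List (String × Int)) : Decidable (Spec_get_word_dic doc_wordList out) := by unfold Spec_get_word_dic; infer_instance

-- ===== CLAIM (what is proved, stated in full; the proofs are below) =====
def Claim_equal_get_word_dic : Prop := ∀ (doc_wordList : List (String × List String)), Dom_get_word_dic doc_wordList → Spec_get_word_dic doc_wordList (get_word_dic doc_wordList)

-- ===== LEMMAS AND PROOFS =====

-- A's loop state after having seen exactly the distinct words u (in first-occurrence order):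
-- wid = |u| and the dict maps each word of u to its position.
def pvStateOf (u : List String) : Int × PySem.Dict String Int :=
  ((u.length : Int), ⟨(PySem.List.enumerate u 0).map (fun p => (p.2, p.1))⟩)

theorem pvEnumAny (w : String) (l : List String) (s : Int) :
    (PySem.List.enumerate l s).any (fun p => p.2 == w) = l.contains w := by
  induction l generalizing s with
  | nil => simp [PySem.List.enumerate_nil]
  | cons x t ih =>
      simp only [PySem.List.enumerate_cons, List.any_cons, ih]
      have : (x == w) = decide (w = x) := by
        rcases eq_or_ne x w with h | h
        · simp [h]
        · simp [h, h.symm]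
      simp [this]

theorem pvStateOf_contains (u : List String) (w : String) :
    (pvStateOf u).2.contains w = u.contains w := by
  simp only [pvStateOf, PySem.Dict.contains]
  rw [List.any_map]
  exact pvEnumAny w u 0

theorem pvInsert_not_mem (u : List String) (w : String) (hw : w ∉ u) :
    (pvStateOf u).2.insert w (pvStateOf u).1 = (pvStateOf (u ++ [w])).2 := by
  have hc : (pvStateOf u).2.contains w = false := by
    rw [pvStateOf_contains]; simpa using hw
  rw [PySem.Dict.insert, hc]
  simp [pvStateOf, PySem.List.enumerate_append, PySem.List.enumerate_cons,
    PySem.List.enumerate_nil]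

theorem pvStateOf_step (u : List String) (w : String) :
    (if !((pvStateOf u).2.contains w) then
        ((pvStateOf u).1 + 1, (pvStateOf u).2.insert w (pvStateOf u).1)
      else pvStateOf u) = pvStateOf (PySem.Set.add u w) := by
  rw [pvStateOf_contains]
  by_cases hw : w ∈ u
  · rw [PySem.Set.add_of_mem hw]
    have hc : u.contains w = true := by simpa using hw
    rw [hc]
    simp
  · rw [PySem.Set.add_of_not_mem hw]
    have hc : u.contains w = false := by simpa using hw
    have h1 : (pvStateOf u).1 + 1 = (pvStateOf (u ++ [w])).1 := by simp [pvStateOf]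
    simp only [hc, Bool.not_false, if_true]
    rw [pvInsert_not_mem u w hw, h1]

theorem pvInner (ws : List String) (u : List String) :
    ws.foldl
        (fun (st : Int × PySem.Dict String Int) item =>
          if !(st.2.contains item) then (st.1 + 1, st.2.insert item st.1) else st)
        (pvStateOf u)
      = pvStateOf (ws.foldl PySem.Set.add u) := by
  induction ws generalizing u with
  | nil => rfl
  | cons w ws ih =>
      simp only [List.foldl_cons]
      rw [pvStateOf_step, ih]

theorem pvOuter (dl : List (String × List String)) (u : List String) :
    dl.foldl
        (fun (st : Int × PySem.Dict String Int) doc =>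
          doc.2.foldl
            (fun (st : Int × PySem.Dict String Int) item =>
              if !(st.2.contains item) then (st.1 + 1, st.2.insert item st.1) else st)
            st)
        (pvStateOf u)
      = pvStateOf ((dl.flatMap (fun doc => doc.2)).foldl PySem.Set.add u) := by
  induction dl generalizing u with
  | nil => rfl
  | cons d dl ih =>
      simp only [List.foldl_cons, List.flatMap_cons, List.foldl_append]
      rw [pvInner, ih]

-- ===== B-side lemmas =====

-- the reverse fold is a foldr; characterize it
def pvFirstDict (ps : List (Int × String)) : PySem.Dict String Int :=
  ps.foldr (fun p d => d.insert p.2 p.1) PySem.Dict.empty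

theorem pvFirstDict_get? (ps : List (Int × String)) (w : String) :
    (pvFirstDict ps).get? w = (ps.find? (fun p => p.2 == w)).map (fun p => p.1) := by
  induction ps with
  | nil => simp [pvFirstDict, PySem.Dict.get?_empty]
  | cons p ps ih =>
      simp only [pvFirstDict, List.foldr_cons] at *
      rw [PySem.Dict.get?_insert, List.find?_cons]
      by_cases h : w = p.2
      · simp [h]
      · have : (p.2 == w) = false := by simpa using (Ne.symm h)
        simp [h, this, ih]

theorem pvFirstDict_mem_keys (ps : List (Int × String)) (w : String) :
    w ∈ (pvFirstDict ps).keys ↔ w ∈ ps.map (fun p => p.2) := by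
  induction ps with
  | nil => simp [pvFirstDict, PySem.Dict.keys_empty]
  | cons p ps ih =>
      simp only [pvFirstDict, List.foldr_cons] at ih ⊢
      rw [PySem.Dict.mem_keys_insert, ih, List.map_cons, List.mem_cons]

theorem pvFirstDict_nodup_keys (ps : List (Int × String)) :
    (pvFirstDict ps).keys.Nodup := by
  induction ps with
  | nil => exact PySem.Dict.nodup_keys_empty
  | cons p ps ih => exact PySem.Dict.nodup_keys_insert _ _ _ ih

-- find? over enumerate = first-occurrence index
theorem pvFind_enumerate (xs : List String) (s : Int) (w : String) (hw : w ∈ xs) :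
    (PySem.List.enumerate xs s).find? (fun p => p.2 == w) = some (s + (xs.idxOf w : Int), w) := by
  induction xs generalizing s with
  | nil => cases hw
  | cons x xs ih =>
      rw [PySem.List.enumerate_cons, List.find?_cons]
      by_cases h : x = w
      · subst h
        simp [List.idxOf_cons_self]
      · have hb : (x == w) = false := by simpa using h
        have hw' : w ∈ xs := by
          rcases List.mem_cons.mp hw with h' | h'
          · exact absurd h'.symm h
          · exact h'
        rw [hb]
        rw [ih (s + 1) hw']
        have hidx : (x :: xs).idxOf w = xs.idxOf w + 1 := by simp [List.idxOf_cons, hb]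
        rw [hidx]
        have : s + 1 + ((xs.idxOf w : Nat) : Int) = s + ((xs.idxOf w + 1 : Nat) : Int) := by
          push_cast
          ring
        rw [this]


-- dedup structural lemma: folding Set.add through an accumulator filters the ordered dedup
theorem pvFoldlAdd (l : List String) (acc : List String) :
    l.foldl PySem.Set.add acc
      = acc ++ (PySem.Set.ofList l).filter (fun y => !(acc.contains y)) := by
  induction l generalizing acc with
  | nil => simp [PySem.Set.ofList]
  | cons x l ih =>
      have hadd : PySem.Set.add ([] : List String) x = [x] := rfl
      have hofl : PySem.Set.ofList (x :: l)
          = x :: (PySem.Set.ofList l).filter (fun y => !(([x] : List String).contains y)) := by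
        rw [PySem.Set.ofList_eq_foldl, List.foldl_cons, hadd, ih]
        rfl
      simp only [List.foldl_cons]
      rw [ih (PySem.Set.add acc x), hofl]
      by_cases h : x ∈ acc
      · rw [PySem.Set.add_of_mem h]
        rw [List.filter_cons_of_neg (p := fun y => !acc.contains y) (by simp [h]),
          List.filter_filter]
        congr 1
        apply List.filter_congr
        intro y hy
        by_cases hyx : y = x
        · subst hyx; simp [h]
        · by_cases hya : y ∈ acc <;> simp [hya, hyx]
      · rw [PySem.Set.add_of_not_mem h]
        rw [List.filter_cons_of_pos (p := fun y => !acc.contains y) (by simp [h]),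
          List.filter_filter, List.append_assoc]
        congr 1
        simp only [List.singleton_append]
        congr 1
        apply List.filter_congr
        intro y hy
        by_cases hyx : y = x
        · subst hyx; simp
        · by_cases hya : y ∈ acc <;> simp [hya, hyx]

theorem pvDedupCons (x : String) (l : List String) :
    PySem.List.dedup (x :: l) = x :: (PySem.List.dedup l).filter (fun y => !(y == x)) := by
  have h1 : PySem.List.dedup (x :: l) = (x :: l).foldl PySem.Set.add [] := by
    rw [PySem.List.dedup_eq_ofList, PySem.Set.ofList_eq_foldl]
  have hadd : PySem.Set.add ([] : List String) x = [x] := rfl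
  rw [h1, List.foldl_cons, hadd, pvFoldlAdd, PySem.List.dedup_eq_ofList]
  simp only [List.singleton_append, List.cons.injEq, true_and]
  apply List.filter_congr
  intro y hy
  by_cases hyx : y = x
  · subst hyx; simp
  · simp [hyx]

theorem pvDedupPairwiseIdx (l : List String) :
    (PySem.List.dedup l).Pairwise (fun a b => l.idxOf a < l.idxOf b) := by
  induction l with
  | nil => simp [PySem.List.dedup]
  | cons x l ih =>
      rw [pvDedupCons, List.pairwise_cons]
      constructor
      · intro b hb
        have hbx : (b == x) = false := by
          have := List.of_mem_filter hb
          simpa using this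
        have hxb : (x == b) = false := by
          rcases eq_or_ne x b with e | e
          · rw [e] at hbx; simp at hbx
          · simpa using e
        have : (x :: l).idxOf b = l.idxOf b + 1 := by simp [List.idxOf_cons, hxb]
        rw [this, List.idxOf_cons_self]
        omega
      · refine List.Pairwise.imp_of_mem ?_ (ih.filter _)
        intro a b ha hb hab
        have hax : (a == x) = false := by simpa using List.of_mem_filter ha
        have hbx : (b == x) = false := by simpa using List.of_mem_filter hb
        have hxa : (x == a) = false := by
          rcases eq_or_ne x a with e | e
          · rw [e] at hax; simp at hax
          · simpa using e
        have hxb : (x == b) = false := by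
          rcases eq_or_ne x b with e | e
          · rw [e] at hbx; simp at hbx
          · simpa using e
        have h1 : (x :: l).idxOf a = l.idxOf a + 1 := by simp [List.idxOf_cons, hxa]
        have h2 : (x :: l).idxOf b = l.idxOf b + 1 := by simp [List.idxOf_cons, hxb]
        omega

-- enumerate, with the pair swapped, is a zip with range
theorem pvEnumZip (xs : List String) (s : Int) :
    (PySem.List.enumerate xs s).map (fun p => (p.2, p.1))
      = xs.zip (PySem.List.pyRange s (s + xs.length) 1) := by
  induction xs generalizing s with
  | nil => simp [PySem.List.enumerate_nil, PySem.List.pyRange]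
  | cons x xs ih =>
      have hlt : s < s + ((x :: xs).length : Int) := by
        simp only [List.length_cons]
        push_cast
        omega
      rw [PySem.List.pyRange_one_cons hlt, PySem.List.enumerate_cons]
      simp only [List.map_cons, List.zip_cons_cons]
      rw [ih (s + 1)]
      congr 3
      simp only [List.length_cons]
      push_cast
      omega

-- ===== VERDICT (by name: the statement is the Claim_ definition above) =====
theorem get_word_dic_spec : Claim_equal_get_word_dic := by
  intro dl _
  show get_word_dic dl = get_word_dic_alt dl
  have h0 : ((0 : Int), (PySem.Dict.empty : PySem.Dict String Int)) = pvStateOf [] := rfl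
  unfold get_word_dic get_word_dic_alt
  rw [h0, pvOuter]
  generalize dl.flatMap (fun doc => doc.2) = words
  simp only []
  have hfold : ∀ ps : List (Int × String),
      (ps.reverse).foldl (fun (d : PySem.Dict String Int) p => d.insert p.2 p.1) PySem.Dict.empty
        = pvFirstDict ps := fun ps => List.foldl_reverse
  rw [hfold]
  set first := pvFirstDict (PySem.List.enumerate words 0) with hf
  set D := PySem.List.dedup words with hD
  -- lookups in first are first-occurrence indices
  have hkey : ∀ w ∈ words, first.getD w 0 = (words.idxOf w : Int) := by
    intro w hw
    rw [hf, PySem.Dict.getD_eq_get?_getD, pvFirstDict_get?, pvFind_enumerate words 0 w hw]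
    simp
  -- the sorted key list is exactly the ordered dedup D
  have horder : PySem.List.sorted first.keys (fun w => first.getD w 0) false = D := by
    apply PySem.List.sorted_eq_of_perm_of_pairwise_lt
    · rw [List.perm_ext_iff_of_nodup (by rw [hD]; exact PySem.List.nodup_dedup words)
        (by rw [hf]; exact pvFirstDict_nodup_keys _)]
      intro a
      rw [hf, pvFirstDict_mem_keys, PySem.List.map_snd_enumerate, hD, PySem.List.mem_dedup]
    · refine List.Pairwise.imp_of_mem ?_ (by rw [hD]; exact pvDedupPairwiseIdx words)
      intro a b ha hb hab
      have ha' : a ∈ words := by rw [hD, PySem.List.mem_dedup] at ha; exact ha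
      have hb' : b ∈ words := by rw [hD, PySem.List.mem_dedup] at hb; exact hb
      rw [hkey a ha', hkey b hb']
      exact_mod_cast hab
  rw [horder]
  -- the final dict is built over fresh distinct keys: its items are the zip itself
  have hfresh : (PySem.Dict.ofList (D.zip (PySem.List.pyRange 0 (D.length : Int) 1))).items
      = D.zip (PySem.List.pyRange 0 (D.length : Int) 1) := by
    have hlen : (PySem.List.pyRange 0 (D.length : Int) 1).length = D.length := by
      rw [PySem.List.length_pyRange_one]
      simp
    have hmapfst : (D.zip (PySem.List.pyRange 0 (D.length : Int) 1)).map Prod.fst = D :=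
      List.map_fst_zip (by rw [hlen])
    have hfr := PySem.Dict.items_foldl_insert_fresh
      (D.zip (PySem.List.pyRange 0 (D.length : Int) 1)) Prod.fst Prod.snd PySem.Dict.empty
      (fun a _ => PySem.Dict.contains_empty _)
      (by rw [hmapfst, hD]; exact PySem.List.nodup_dedup words)
    rw [PySem.Dict.ofList, PySem.Dict.update, hfr]
    simp [PySem.Dict.empty]
  rw [hfresh]
  -- A's value: the dict state over the distinct words, swapped enumerate = the same zip
  have hAfold : words.foldl PySem.Set.add [] = D := by
    rw [hD, PySem.List.dedup_eq_ofList, PySem.Set.ofList_eq_foldl]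
  rw [hAfold]
  show (PySem.List.enumerate D 0).map (fun p => (p.2, p.1)) = _
  rw [pvEnumZip]
  simp
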